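-- pv_equiv track=rewrite | github.com/ghost0507/PhotoFiltreStudioX_Keygen | pfsX_keygen.py | GenerateRegCode
-- ===== SOURCE A (Python) =====
-- def GenerateRegCode(name : str):
--   Data = [0x7B, 0x4D, 0x86, 0x4E, 0x63, 0x45, 0xBC]
--   Result = ''
--   if(len(name)>=5):
--       S = name.lower().replace(' ', '')
--       T = 0
--       for i in range(len(S)-1,-1, -1):
--           T += ord(S[i]) - i - 1
--       S = '{:3d}{:02d}01234'.format(T % 0x3E8, len(S) % 0x64)
--       for i in range(10):
--           Result += '{0:02X}'.format(Data[(i + 1) % 7] ^ ord(S[i]))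
--       Result = Result[:5] + '-' + Result[5:10] + '-' + Result[10:15] + '-' + Result[15:20]
--       return Result
--   else:
--       return ''
-- ===== SOURCE B (Python) =====
-- def GenerateRegCode(name: str):
--     if len(name) < 5:
--         return ''
--     s = [ord(c) for c in name.lower() if c != ' ']
--     n = len(s)
--     t = (sum(s) - n * (n + 1) // 2) % 1000
--     m = n % 100
--     seed = [32 if t < 100 else 48 + t // 100,
--             32 if t < 10 else 48 + t // 10 % 10,
--             48 + t % 10,
--             48 + m // 10,
--             48 + m % 10]
--     keys = (0x4D, 0x86, 0x4E, 0x63, 0x45)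
--     h = '%02X' * 5 % tuple(k ^ c for k, c in zip(keys, seed))
--     return h[:5] + '-' + h[5:] + '-8C4A7-FB57A'
-- ===== Notes on version B (the rewrite author's own statement) =====
-- stated objective: simpler
-- what changed: B drops A's format-string pipeline entirely: instead of building '{:3d}{:02d}01234', looping 10 times over a 7-byte key cycle and slicing the 20-char hex string, B computes the checksum by the closed-form triangular sum, derives the five variable seed character codes by digit arithmetic, XORs them with a fixed 5-key table, and appends the constant tail '-8C4A7-FB57A' pre-computed from the five fixed seed characters '01234'.
import Mathlib
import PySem

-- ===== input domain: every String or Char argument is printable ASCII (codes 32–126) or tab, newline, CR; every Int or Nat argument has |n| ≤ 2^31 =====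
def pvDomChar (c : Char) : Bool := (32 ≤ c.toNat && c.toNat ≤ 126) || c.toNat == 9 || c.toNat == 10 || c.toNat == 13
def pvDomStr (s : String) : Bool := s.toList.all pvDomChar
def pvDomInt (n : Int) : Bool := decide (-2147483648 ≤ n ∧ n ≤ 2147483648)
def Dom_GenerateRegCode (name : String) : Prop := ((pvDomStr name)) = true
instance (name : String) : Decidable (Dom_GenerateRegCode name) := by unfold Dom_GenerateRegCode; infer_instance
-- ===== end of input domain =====

-- B replaces A's format-string pipeline by direct arithmetic: it derives the five variable
-- seed character codes by digit arithmetic (no '{:3d}{:02d}01234' string), XORs them with a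
-- fixed key table, and appends the constant tail '-8C4A7-FB57A' pre-computed from the five
-- fixed seed characters '01234' (objective: simpler); the return value is proved equal on
-- all inputs.

-- ===== PORT A =====
-- format helpers for A's '{0:02X}', '{:3d}', '{:02d}' (pvFmtHex2 is also B's '%02X').
def pvHexDigit (n : Nat) : Char := if n < 10 then Char.ofNat (48 + n) else Char.ofNat (55 + n)

-- uppercase hex digits of n; fuel-bounded structural recursion (fuel = n + 1 suffices)
def pvHexDigits : Nat → Nat → List Char
  | 0, _ => []
  | fuel + 1, n => if n < 16 then [pvHexDigit n] else pvHexDigits fuel (n / 16) ++ [pvHexDigit (n % 16)]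

-- '{0:02X}'.format(v)  (identically '%02X' % v)
def pvFmtHex2 (v : Int) : List Char :=
  PySem.Chars.zfill (if v < 0 then '-' :: pvHexDigits v.natAbs v.natAbs else pvHexDigits (v.toNat + 1) v.toNat) 2

-- '{:3d}'.format(x): right-align in width 3, space padding
def pvFmt3d (x : Int) : List Char :=
  let d := PySem.Int.toChars x
  List.replicate (3 - d.length) ' ' ++ d

-- '{:3d}{:02d}01234'.format(t, m)
def pvFmtS (t m : Int) : List Char :=
  pvFmt3d t ++ PySem.Chars.zfill (PySem.Int.toChars m) 2 ++ ['0', '1', '2', '3', '4']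

def pvData : List Int := [0x7B, 0x4D, 0x86, 0x4E, 0x63, 0x45, 0xBC]

def GenerateRegCode (name : String) : String :=
  if 5 ≤ PySem.Str.len name then
    let S := PySem.Chars.replace (PySem.Chars.lower name.toList) [' '] []
    let T := (PySem.List.pyRange ((S.length : Int) - 1) (-1) (-1)).foldl
      (fun T i => T + ((PySem.List.pyGetD S i ' ').toNat : Int) - i - 1) 0
    let S2 := pvFmtS (PySem.Int.mod T 0x3E8) (PySem.Int.mod (S.length : Int) 0x64)
    let Result := (PySem.List.pyRange 0 10 1).foldl
      (fun R i => R ++ pvFmtHex2 (PySem.Int.bxor (PySem.List.pyGetD pvData (PySem.Int.mod (i + 1) 7) 0)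
        ((PySem.List.pyGetD S2 i ' ').toNat : Int))) []
    String.ofList (PySem.List.slice Result none (some 5) ++ ['-'] ++ PySem.List.slice Result (some 5) (some 10)
      ++ ['-'] ++ PySem.List.slice Result (some 10) (some 15) ++ ['-'] ++ PySem.List.slice Result (some 15) (some 20))
  else ""

-- ===== PORT B =====
def GenerateRegCode_alt (name : String) : String :=
  if PySem.Str.len name < 5 then "" else
    let s := ((PySem.Chars.lower name.toList).filter (fun c => c ≠ ' ')).map (fun c => (c.toNat : Int))
    let n : Int := s.length
    let t := PySem.Int.mod (s.sum - PySem.Int.floordiv (n * (n + 1)) 2) 1000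
    let m := PySem.Int.mod n 100
    let seed : List Int := [if t < 100 then 32 else 48 + PySem.Int.floordiv t 100,
      if t < 10 then 32 else 48 + PySem.Int.mod (PySem.Int.floordiv t 10) 10,
      48 + PySem.Int.mod t 10,
      48 + PySem.Int.floordiv m 10,
      48 + PySem.Int.mod m 10]
    let keys : List Int := [0x4D, 0x86, 0x4E, 0x63, 0x45]
    let h := ((keys.zip seed).map (fun p => pvFmtHex2 (PySem.Int.bxor p.1 p.2))).flatten
    String.ofList (PySem.List.slice h none (some 5) ++ ['-'] ++ PySem.List.slice h (some 5) none
      ++ "-8C4A7-FB57A".toList)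

-- ===== PRECONDITION & SPEC =====
def Spec_GenerateRegCode (name : String) (out : String) : Prop := out = GenerateRegCode_alt name
instance (name : String) (out : String) : Decidable (Spec_GenerateRegCode name out) := by unfold Spec_GenerateRegCode; infer_instance

-- ===== CLAIM (what is proved, stated in full; the proofs are below) =====
def Claim_equal_GenerateRegCode : Prop := ∀ (name : String), Dom_GenerateRegCode name → Spec_GenerateRegCode name (GenerateRegCode name)

-- ===== LEMMAS AND PROOFS =====
set_option maxRecDepth 10000

-- name.lower().replace(' ','') removes exactly the spaces: A's replace = B's filter
lemma pv_go_filter : ∀ (fuel : Nat) (l acc : List Char), l.length ≤ fuel →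
    PySem.Chars.replace.go [' '] [] fuel l acc = acc.reverse ++ l.filter (fun c => c ≠ ' ') := by
  intro fuel
  induction fuel with
  | zero => intro l acc h; simp at h; simp [h, PySem.Chars.replace.go]
  | succ f ih =>
    intro l acc h
    cases l with
    | nil => simp [PySem.Chars.replace.go]
    | cons c t =>
      rw [PySem.Chars.replace.go]
      by_cases hc : c = ' '
      · subst hc
        simp only [List.isPrefixOf]
        rw [ih _ _ (by simpa using h)]
        simp
      · have hp : [' '].isPrefixOf (c :: t) = false := by
          simp [List.isPrefixOf]
          exact fun h' => hc h'.symm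
        rw [if_neg (by simp [hp])]
        rw [ih _ _ (by simpa using h)]
        simp [hc]

lemma pv_replace_eq_filter (l : List Char) :
    PySem.Chars.replace l [' '] [] = l.filter (fun c => c ≠ ' ') := by
  rw [PySem.Chars.replace]
  simp [pv_go_filter l.length l [] le_rfl]

lemma pv_sum_map_sub {α : Type} (l : List α) (f g : α → Int) :
    (l.map (fun x => f x - g x)).sum = (l.map f).sum - (l.map g).sum := by
  induction l with
  | nil => simp
  | cons x xs ih => simp [ih]; ring

lemma pv_map_getD_range (l : List Char) (d : Char) :
    (List.range l.length).map (fun k => l.getD k d) = l := by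
  apply List.ext_getElem
  · simp
  · intro i h1 h2
    simp [List.getD_eq_getElem?_getD, List.getElem?_eq_getElem h2]

lemma pv_gauss (n : Nat) : ((List.range n).map (fun (k : Nat) => ((k : Int) + 1))).sum
    = PySem.Int.floordiv ((n : Int) * ((n : Int) + 1)) 2 := by
  rw [PySem.Int.floordiv_eq_ediv_of_pos (by norm_num)]
  induction n with
  | zero => simp
  | succ m ih =>
    simp only [List.range_succ, List.map_append, List.sum_append, ih]
    simp only [List.map_cons, List.map_nil, List.sum_cons, List.sum_nil]
    obtain ⟨k, hk⟩ := Int.even_mul_succ_self (m : Int)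
    push_cast
    have e1 : ((m : Int) + 1) * ((m : Int) + 1 + 1) = (m : Int) * ((m : Int) + 1) + 2 * ((m : Int) + 1) := by ring
    rw [e1]
    omega

-- (1) A's backward indexed loop equals the closed-form checksum
lemma pvT_eq (S : List Char) :
    (PySem.List.pyRange ((S.length : Int) - 1) (-1) (-1)).foldl
      (fun T i => T + ((PySem.List.pyGetD S i ' ').toNat : Int) - i - 1) 0
    = ((S.map (fun c => (c.toNat : Int))).sum
      - PySem.Int.floordiv ((S.length : Int) * ((S.length : Int) + 1)) 2) := by
  have hr : PySem.List.pyRange ((S.length : Int) - 1) (-1) (-1)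
      = (PySem.List.pyRange 0 (S.length : Int) 1).reverse := by
    rw [PySem.List.pyRange_neg_one_eq_reverse]; norm_num
  have hf : (fun (T i : Int) => T + ((PySem.List.pyGetD S i ' ').toNat : Int) - i - 1)
      = (fun (T i : Int) => T + (((PySem.List.pyGetD S i ' ').toNat : Int) - i - 1)) := by
    funext a b; ring
  rw [hr, hf, PySem.List.foldl_add, List.map_reverse, List.sum_reverse, PySem.List.pyRange_one]
  simp only [Int.sub_zero, Int.toNat_natCast, List.map_map]
  have hc : ∀ k ∈ List.range S.length,
      (((fun i => (((PySem.List.pyGetD S i ' ').toNat : Nat) : Int) - i - 1) ∘ fun (k : Nat) => (0 : Int) + ↑k) k)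
      = (fun (k : Nat) => (((S.getD k ' ').toNat : Int) - ((k : Int) + 1))) k := by
    intro k hk
    simp [PySem.List.pyGetD_natCast]
    ring
  rw [List.map_congr_left hc, pv_sum_map_sub, pv_gauss, zero_add]
  congr 1
  conv_rhs => rw [← pv_map_getD_range S ' ', List.map_map]
  rfl

-- (2) shapes of the formatted pieces, and B's digit arithmetic = A's formatted characters
lemma pvFmt3d_len : ∀ t < 1000, (pvFmt3d (t : Nat)).length = 3
    ∧ (pvFmt3d (t : Nat)).all (fun c => decide (c.toNat < 128)) := by decide

lemma pvFmt02_len : ∀ m < 100, (PySem.Chars.zfill (PySem.Int.toChars (m : Nat)) 2).length = 2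
    ∧ (PySem.Chars.zfill (PySem.Int.toChars (m : Nat)) 2).all (fun c => decide (c.toNat < 128)) := by decide

lemma pvSeed3 : ∀ t < 1000, (pvFmt3d (t : Nat)).map (fun c => (c.toNat : Int)) =
    [if ((t : Nat) : Int) < 100 then 32 else 48 + PySem.Int.floordiv ((t : Nat) : Int) 100,
     if ((t : Nat) : Int) < 10 then 32 else 48 + PySem.Int.mod (PySem.Int.floordiv ((t : Nat) : Int) 10) 10,
     48 + PySem.Int.mod ((t : Nat) : Int) 10] := by decide

lemma pvSeed2 : ∀ m < 100, (PySem.Chars.zfill (PySem.Int.toChars (m : Nat)) 2).map (fun c => (c.toNat : Int)) =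
    [48 + PySem.Int.floordiv ((m : Nat) : Int) 10, 48 + PySem.Int.mod ((m : Nat) : Int) 10] := by decide

lemma pvFmtHex2_len : ∀ v < 256, (pvFmtHex2 (v : Nat)).length = 2 := by decide

lemma pvFmt3d_shape (t : Int) (h0 : 0 ≤ t) (h1 : t < 1000) :
    ∃ a b c, pvFmt3d t = [a, b, c] ∧ a.toNat < 128 ∧ b.toNat < 128 ∧ c.toNat < 128 := by
  have ht : t = ((t.toNat : Nat) : Int) := by omega
  rw [ht]
  obtain ⟨hl, hall⟩ := pvFmt3d_len t.toNat (by omega)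
  obtain ⟨a, b, c, habc⟩ := List.length_eq_three.mp hl
  rw [habc] at hall
  refine ⟨a, b, c, habc, ?_, ?_, ?_⟩
  · simpa using of_decide_eq_true (List.all_eq_true.mp hall a (by simp))
  · simpa using of_decide_eq_true (List.all_eq_true.mp hall b (by simp))
  · simpa using of_decide_eq_true (List.all_eq_true.mp hall c (by simp))

lemma pvFmt02_shape (m : Int) (h0 : 0 ≤ m) (h1 : m < 100) :
    ∃ a b, PySem.Chars.zfill (PySem.Int.toChars m) 2 = [a, b] ∧ a.toNat < 128 ∧ b.toNat < 128 := by
  have hm : m = ((m.toNat : Nat) : Int) := by omega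
  rw [hm]
  obtain ⟨hl, hall⟩ := pvFmt02_len m.toNat (by omega)
  obtain ⟨a, b, hab⟩ := List.length_eq_two.mp hl
  rw [hab] at hall
  refine ⟨a, b, hab, ?_, ?_⟩
  · simpa using of_decide_eq_true (List.all_eq_true.mp hall a (by simp))
  · simpa using of_decide_eq_true (List.all_eq_true.mp hall b (by simp))

-- (3) the two hex characters of one output byte
lemma pvFmtHex2_pair (d : Int) (c : Char) (hd0 : 0 ≤ d) (hd : d < 256) (hc : c.toNat < 256) :
    ∃ a b, pvFmtHex2 (PySem.Int.bxor d ((c.toNat : Nat) : Int)) = [a, b] := by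
  rw [PySem.Int.bxor_of_nonneg hd0 (by positivity)]
  apply List.length_eq_two.mp
  apply pvFmtHex2_len
  have h8 : d.toNat < 256 := by omega
  have hcn : ((c.toNat : Int)).toNat = c.toNat := by omega
  rw [hcn]
  exact Nat.xor_lt_two_pow (n := 8) h8 hc

-- (4) the core assembly: A's 10-iteration loop + manual slicing on the fixed-tail format
-- string equals B's five keyed bytes plus the constant tail '-8C4A7-FB57A'
lemma pvCore (c0 c1 c2 c3 c4 : Char)
    (h0 : c0.toNat < 128) (h1 : c1.toNat < 128) (h2 : c2.toNat < 128)
    (h3 : c3.toNat < 128) (h4 : c4.toNat < 128) :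
    (let S2 : List Char := [c0, c1, c2, c3, c4, '0', '1', '2', '3', '4']
     let Result := (PySem.List.pyRange 0 10 1).foldl
      (fun R i => R ++ pvFmtHex2 (PySem.Int.bxor (PySem.List.pyGetD pvData (PySem.Int.mod (i + 1) 7) 0)
        ((PySem.List.pyGetD S2 i ' ').toNat : Int))) []
     PySem.List.slice Result none (some 5) ++ ['-'] ++ PySem.List.slice Result (some 5) (some 10)
      ++ ['-'] ++ PySem.List.slice Result (some 10) (some 15) ++ ['-'] ++ PySem.List.slice Result (some 15) (some 20))
    = (let h := (([0x4D, 0x86, 0x4E, 0x63, 0x45].zip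
        [((c0.toNat : Nat) : Int), ((c1.toNat : Nat) : Int), ((c2.toNat : Nat) : Int),
         ((c3.toNat : Nat) : Int), ((c4.toNat : Nat) : Int)]).map
        (fun p => pvFmtHex2 (PySem.Int.bxor p.1 p.2))).flatten
       PySem.List.slice h none (some 5) ++ ['-'] ++ PySem.List.slice h (some 5) none
        ++ "-8C4A7-FB57A".toList) := by
  obtain ⟨a0, b0, e0⟩ := pvFmtHex2_pair 0x4D c0 (by norm_num) (by norm_num) (by omega)
  obtain ⟨a1, b1, e1⟩ := pvFmtHex2_pair 0x86 c1 (by norm_num) (by norm_num) (by omega)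
  obtain ⟨a2, b2, e2⟩ := pvFmtHex2_pair 0x4E c2 (by norm_num) (by norm_num) (by omega)
  obtain ⟨a3, b3, e3⟩ := pvFmtHex2_pair 0x63 c3 (by norm_num) (by norm_num) (by omega)
  obtain ⟨a4, b4, e4⟩ := pvFmtHex2_pair 0x45 c4 (by norm_num) (by norm_num) (by omega)
  simp only [show PySem.List.pyRange 0 10 1 = [0,1,2,3,4,5,6,7,8,9] from by decide,
    List.foldl_cons, List.foldl_nil, List.zip, List.zipWith, List.map_cons, List.map_nil]
  norm_num [PySem.List.pyGetD_ofNat', PySem.List.pyGetD,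
    show PySem.List.pyGet? pvData 0 = some 123 from by decide,
    show PySem.List.pyGet? pvData 1 = some 77 from by decide,
    show PySem.List.pyGet? pvData 2 = some 134 from by decide,
    show PySem.List.pyGet? pvData 3 = some 78 from by decide,
    show PySem.List.pyGet? pvData 4 = some 99 from by decide,
    show PySem.List.pyGet? pvData 5 = some 69 from by decide,
    show PySem.List.pyGet? pvData 6 = some 188 from by decide,
    show pvFmtHex2 (PySem.Int.bxor 188 48) = ['8','C'] from by decide,
    show pvFmtHex2 (PySem.Int.bxor 123 49) = ['4','A'] from by decide,
    show pvFmtHex2 (PySem.Int.bxor 77 50) = ['7','F'] from by decide,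
    show pvFmtHex2 (PySem.Int.bxor 134 51) = ['B','5'] from by decide,
    show pvFmtHex2 (PySem.Int.bxor 78 52) = ['7','A'] from by decide,
    show Int.toNat 2 = 2 from rfl, show Int.toNat 3 = 3 from rfl,
    show Int.toNat 4 = 4 from rfl, show Int.toNat 5 = 5 from rfl,
    show Int.toNat 6 = 6 from rfl, show Int.toNat 7 = 7 from rfl,
    show Int.toNat 8 = 8 from rfl, show Int.toNat 9 = 9 from rfl,
    show Int.toNat 10 = 10 from rfl, show Int.toNat 15 = 15 from rfl,
    show Int.toNat 20 = 20 from rfl,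
    e0, e1, e2, e3, e4,
    PySem.List.slice_toNat, PySem.List.slice_to, PySem.List.slice_from,
    show ("-8C4A7-FB57A".toList) = ['-','8','C','4','A','7','-','F','B','5','7','A'] from by decide]
  decide

-- ===== VERDICT (by name: the statement is the Claim_ definition above) =====
theorem GenerateRegCode_spec : Claim_equal_GenerateRegCode := by
  intro name _
  unfold Spec_GenerateRegCode GenerateRegCode GenerateRegCode_alt
  by_cases h : PySem.Str.len name < 5
  · rw [if_neg (by omega), if_pos h]
  · rw [if_pos (by omega), if_neg h]
    simp only [pvT_eq, pv_replace_eq_filter, List.length_map]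
    set F := (PySem.Chars.lower name.toList).filter (fun c => c ≠ ' ') with hF
    set tv := PySem.Int.mod ((F.map (fun c => (c.toNat : Int))).sum
      - PySem.Int.floordiv ((F.length : Int) * ((F.length : Int) + 1)) 2) 0x3E8 with htv
    set mv := PySem.Int.mod ((F.length : Int)) 0x64 with hmv
    have htv0 : 0 ≤ tv := PySem.Int.mod_nonneg _ (by norm_num)
    have htv1 : tv < 1000 := PySem.Int.mod_lt _ (by norm_num)
    have hmv0 : 0 ≤ mv := PySem.Int.mod_nonneg _ (by norm_num)
    have hmv1 : mv < 100 := PySem.Int.mod_lt _ (by norm_num)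
    obtain ⟨a, b, c, habc, ha, hb, hc⟩ := pvFmt3d_shape tv htv0 htv1
    obtain ⟨d, e, hde, hd, he⟩ := pvFmt02_shape mv hmv0 hmv1
    have hfmt : pvFmtS tv mv = [a, b, c, d, e, '0', '1', '2', '3', '4'] := by
      rw [pvFmtS, habc, hde]; rfl
    -- B's seed arithmetic equals the character codes of A's formatted pieces
    have h3 := pvSeed3 tv.toNat (by omega)
    rw [show ((tv.toNat : Nat) : Int) = tv from by omega, habc] at h3
    have h2 := pvSeed2 mv.toNat (by omega)
    rw [show ((mv.toNat : Nat) : Int) = mv from by omega, hde] at h2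
    simp only [List.map_cons, List.map_nil] at h3 h2
    injection h3 with x1 r1; injection r1 with x2 r2; injection r2 with x3 _
    injection h2 with x4 r4; injection r4 with x5 _
    rw [hfmt, ← x1, ← x2, ← x3, ← x4, ← x5]
    exact congrArg String.ofList (pvCore a b c d e ha hb hc hd he)
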